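-- pv_equiv track=rewrite | github.com/supLeleh/simple-file-manager-react | backend/utils/resources_utils.py | parse_ribs
-- ===== SOURCE A (Python) =====
-- def parse_ribs(content: str) -> list[str]:
--
--     def validate_lines(line: str) -> bool:
--         return not line.startswith(("flags", "S = Stale", "origin"))
--
--     result = content.split("\n")
--     result = list(map(lambda item: item.strip(), result))  # remove trailing spaces
--     result = list(map(lambda item: ' '.join(item.split()), result))  # normalize inner spaces
--     result = list(map(lambda item: item[2:] if item.startswith("*>") else item, result))  # remove starting prefix "*>" if present
--     result = list(map(lambda item: item.strip(), result))  # remove trailing spaces again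
--     result = list(filter(validate_lines, result))  # remove possible heading lines
--     result = [item for item in result if item != ""]  # remove empty lines
--     return result
-- ===== SOURCE B (Python) =====
-- def parse_ribs(content: str) -> list[str]:
--
--     def stale_heading(toks: list[str]) -> bool:
--         return len(toks) >= 3 and toks[0] == "S" and toks[1] == "=" and toks[2].startswith("Stale")
--
--     out = []
--     for line in content.split("\n"):
--         toks = line.split()
--         if not toks:
--             continue
--         if toks[0] == "*>":
--             toks = toks[1:]
--         elif toks[0].startswith("*>"):
--             toks = [toks[0][2:]] + toks[1:]
--         if not toks:
--             continue
--         if toks[0].startswith(("flags", "origin")):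
--             continue
--         if stale_heading(toks):
--             continue
--         out.append(" ".join(toks))
--     return out
-- ===== Notes on version B (the rewrite author's own statement) =====
-- stated objective: alternative
-- what changed: B works on the token list of each line instead of rebuilding normalized strings: it splits a line into words once, removes the best-route prefix marker by dropping or trimming the first token, decides every heading filter on the tokens themselves (flags/origin on the first token, the stale legend as a three-token pattern), and joins tokens only for the lines it keeps, whereas A runs seven string-level map/filter passes each materializing a list of re-built strings.
import Mathlib
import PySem

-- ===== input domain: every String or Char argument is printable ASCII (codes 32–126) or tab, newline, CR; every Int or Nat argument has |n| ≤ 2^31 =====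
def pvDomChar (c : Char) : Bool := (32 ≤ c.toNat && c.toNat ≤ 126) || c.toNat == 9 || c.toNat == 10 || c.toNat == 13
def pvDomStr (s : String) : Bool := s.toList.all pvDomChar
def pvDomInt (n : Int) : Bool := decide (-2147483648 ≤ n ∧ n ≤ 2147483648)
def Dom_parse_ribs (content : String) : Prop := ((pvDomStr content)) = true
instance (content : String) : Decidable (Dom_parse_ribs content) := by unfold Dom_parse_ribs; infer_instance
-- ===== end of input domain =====

-- B parses each line at the token level (split once into words, drop/trim a '*>' first token, decide the
-- heading filters on the tokens, join only kept lines) instead of A's seven string-level map/filter passes.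

-- ===== PORT A =====
def parse_ribs (content : String) : List String :=
  let result := (PySem.Str.split? content "\n").getD []
  let result := result.map (fun item => PySem.Str.strip item)
  let result := result.map (fun item => PySem.Str.join " " (PySem.Str.split₀ item))
  let result := result.map (fun item => if PySem.Str.startswith item "*>" then PySem.Str.slice item (some 2) none else item)
  let result := result.map (fun item => PySem.Str.strip item)
  let result := result.filter (fun item =>
    !(PySem.Str.startswith item "flags" || PySem.Str.startswith item "S = Stale" || PySem.Str.startswith item "origin"))
  let result := result.filter (fun item => item != "")
  result

-- ===== PORT B =====
-- Source B's helper stale_heading(toks): len(toks) >= 3 and toks[0] == "S" and toks[1] == "=" and toks[2].startswith("Stale")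
def pvStaleTok (toks : List String) : Bool :=
  match toks with
  | t0 :: t1 :: t2 :: _ => t0 == "S" && t1 == "=" && PySem.Str.startswith t2 "Stale"
  | _ => false

def parse_ribs_alt (content : String) : List String :=
  ((PySem.Str.split? content "\n").getD []).foldl (fun out line =>
    match PySem.Str.split₀ line with
    | [] => out
    | t0 :: rest =>
      let toks :=
        if t0 == "*>" then rest
        else if PySem.Str.startswith t0 "*>" then PySem.Str.slice t0 (some 2) none :: rest
        else t0 :: rest
      match toks with
      | [] => out
      | u0 :: urest =>
        if PySem.Str.startswith u0 "flags" || PySem.Str.startswith u0 "origin" then out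
        else if pvStaleTok (u0 :: urest) then out
        else out ++ [PySem.Str.join " " (u0 :: urest)]) []

-- ===== PRECONDITION & SPEC =====
def Spec_parse_ribs (content : String) (out : List String) : Prop := out = parse_ribs_alt content
instance (content : String) (out : List String) : Decidable (Spec_parse_ribs content out) := by unfold Spec_parse_ribs; infer_instance

-- ===== CLAIM (what is proved, stated in full; the proofs are below) =====
def Claim_equal_parse_ribs : Prop := ∀ (content : String), Dom_parse_ribs content → Spec_parse_ribs content (parse_ribs content)

-- ===== LEMMAS AND PROOFS =====

-- leading whitespace is skipped by split₀'s scanner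
theorem pv_go_dropWhile (s : List Char) (acc : List (List Char)) :
    PySem.Chars.split₀.go (s.dropWhile PySem.Chars.isspace) [] acc = PySem.Chars.split₀.go s [] acc := by
  induction s with
  | nil => rfl
  | cons c rest ih =>
    by_cases h : PySem.Chars.isspace c = true
    · simp [h, PySem.Chars.split₀.go, ih]
    · simp [h]

-- an all-whitespace suffix of the input is ignored by split₀'s scanner
theorem pv_go_spaces (ws : List Char) (hw : ∀ c ∈ ws, PySem.Chars.isspace c = true)
    (cur : List Char) (acc : List (List Char)) :
    PySem.Chars.split₀.go ws cur acc = PySem.Chars.split₀.go [] cur acc := by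
  induction ws generalizing cur acc with
  | nil => rfl
  | cons c rest ih =>
    have hc : PySem.Chars.isspace c = true := hw c (by simp)
    have hr : ∀ c ∈ rest, PySem.Chars.isspace c = true := fun x hx => hw x (by simp [hx])
    by_cases hcur : cur.isEmpty = true
    · simp [PySem.Chars.split₀.go, hc, hcur, ih hr]
    · simp [PySem.Chars.split₀.go, hcur, hc, ih hr]

theorem pv_go_append_spaces (ws : List Char) (hw : ∀ c ∈ ws, PySem.Chars.isspace c = true)
    (s cur : List Char) (acc : List (List Char)) :
    PySem.Chars.split₀.go (s ++ ws) cur acc = PySem.Chars.split₀.go s cur acc := by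
  induction s generalizing cur acc with
  | nil => simpa using pv_go_spaces ws hw cur acc
  | cons c rest ih =>
    by_cases hc : PySem.Chars.isspace c = true
    · by_cases hcur : cur.isEmpty = true
      · simp [PySem.Chars.split₀.go, hc, hcur, ih]
      · simp [PySem.Chars.split₀.go, hc, hcur, ih]
    · simp [PySem.Chars.split₀.go, hc, ih]

theorem pv_split₀_strip (s : List Char) :
    PySem.Chars.split₀ (PySem.Chars.strip s) = PySem.Chars.split₀ s := by
  unfold PySem.Chars.strip PySem.Chars.rstrip PySem.Chars.lstrip
  have h1 : PySem.Chars.split₀ (s.dropWhile PySem.Chars.isspace) = PySem.Chars.split₀ s := by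
    unfold PySem.Chars.split₀; exact pv_go_dropWhile s []
  set t := s.dropWhile PySem.Chars.isspace with ht
  have hsplit : t = ((t.reverse.dropWhile PySem.Chars.isspace).reverse) ++ ((t.reverse.takeWhile PySem.Chars.isspace).reverse) := by
    conv_lhs => rw [← List.reverse_reverse t,
      ← List.takeWhile_append_dropWhile (p := PySem.Chars.isspace) (l := t.reverse)]
    rw [List.reverse_append]
  have hw : ∀ c ∈ (t.reverse.takeWhile PySem.Chars.isspace).reverse, PySem.Chars.isspace c = true := by
    intro c hc; exact List.mem_takeWhile_imp (by simpa using hc)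
  calc PySem.Chars.split₀ (t.reverse.dropWhile PySem.Chars.isspace).reverse
      = PySem.Chars.split₀ ((t.reverse.dropWhile PySem.Chars.isspace).reverse ++ (t.reverse.takeWhile PySem.Chars.isspace).reverse) := by
        unfold PySem.Chars.split₀; exact (pv_go_append_spaces _ hw _ [] []).symm
    _ = PySem.Chars.split₀ t := by rw [← hsplit]
    _ = PySem.Chars.split₀ s := h1

-- every chunk split₀ returns is nonempty and whitespace-free
theorem pv_go_chunks (s cur : List Char) (acc : List (List Char))
    (hcur : ∀ c ∈ cur, PySem.Chars.isspace c = false)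
    (hacc : ∀ p ∈ acc, p ≠ [] ∧ ∀ c ∈ p, PySem.Chars.isspace c = false) :
    ∀ p ∈ PySem.Chars.split₀.go s cur acc, p ≠ [] ∧ ∀ c ∈ p, PySem.Chars.isspace c = false := by
  induction s generalizing cur acc with
  | nil =>
    by_cases h : cur.isEmpty = true
    · simp only [PySem.Chars.split₀.go, h, if_true]
      intro p hp; exact hacc p (by simpa using hp)
    · simp only [PySem.Chars.split₀.go, h]
      intro p hp
      rcases (by simpa using hp : p ∈ acc ∨ p = cur.reverse) with h2 | h1
      case _ => exact hacc p h2
      · subst h1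
        refine ⟨by simpa [List.isEmpty_iff] using h, ?_⟩
        intro c hc; exact hcur c (by simpa using hc)
  | cons c rest ih =>
    by_cases hc : PySem.Chars.isspace c = true
    · by_cases h : cur.isEmpty = true
      · simp only [PySem.Chars.split₀.go, hc, h, if_true]
        exact ih [] acc (by simp) hacc
      · simp only [PySem.Chars.split₀.go, hc, h]
        refine ih [] _ (by simp) ?_
        intro p hp
        rcases (by simpa using hp : p = cur.reverse ∨ p ∈ acc) with h1 | h2
        case _ =>
          subst h1
          refine ⟨by simpa [List.isEmpty_iff] using h, ?_⟩
          intro x hx; exact hcur x (by simpa using hx)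
        case _ => exact hacc p h2
    · simp only [PySem.Chars.split₀.go, hc]
      refine ih (c :: cur) acc ?_ hacc
      intro x hx
      rcases (by simpa using hx : x = c ∨ x ∈ cur) with h1 | h2
      · subst h1; simpa using hc
      · exact hcur x h2

theorem pv_split₀_chunks (s : List Char) :
    ∀ p ∈ PySem.Chars.split₀ s, p ≠ [] ∧ ∀ c ∈ p, PySem.Chars.isspace c = false := by
  unfold PySem.Chars.split₀
  exact pv_go_chunks s [] [] (by simp) (by simp)

-- a nonempty join of nonempty whitespace-free chunks starts and ends with a non-space character
theorem pv_join_ends (parts : List (List Char)) (hne : parts ≠ [])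
    (hp : ∀ p ∈ parts, p ≠ [] ∧ ∀ c ∈ p, PySem.Chars.isspace c = false) :
    (∃ c l, PySem.Chars.join [' '] parts = c :: l ∧ PySem.Chars.isspace c = false) ∧
    (∃ l c, PySem.Chars.join [' '] parts = l ++ [c] ∧ PySem.Chars.isspace c = false) := by
  induction parts with
  | nil => exact absurd rfl hne
  | cons p ps ih =>
    obtain ⟨hpne, hpc⟩ := hp p (by simp)
    cases ps with
    | nil =>
      rw [PySem.Chars.join_singleton]
      obtain ⟨c, cs, rfl⟩ := List.exists_cons_of_ne_nil hpne
      constructor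
      · exact ⟨c, cs, rfl, hpc c (by simp)⟩
      · refine ⟨(c :: cs).dropLast, (c :: cs).getLast (by simp), ?_, ?_⟩
        · exact (List.dropLast_append_getLast (by simp)).symm
        · exact hpc _ (List.getLast_mem _)
    | cons q qs =>
      rw [PySem.Chars.join_cons_cons]
      obtain ⟨⟨c, l, hcl, hc⟩, ⟨l2, c2, hlc, hc2⟩⟩ :=
        ih (by simp) (fun x hx => hp x (by simp [hx]))
      obtain ⟨c0, cs0, rfl⟩ := List.exists_cons_of_ne_nil hpne
      constructor
      · exact ⟨c0, cs0 ++ ' ' :: PySem.Chars.join [' '] (q :: qs), by simp, hpc c0 (by simp)⟩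
      · refine ⟨(c0 :: cs0) ++ [' '] ++ l2, c2, ?_, hc2⟩
        rw [hlc]; simp

theorem pv_strip_join (parts : List (List Char))
    (hp : ∀ p ∈ parts, p ≠ [] ∧ ∀ c ∈ p, PySem.Chars.isspace c = false) :
    PySem.Chars.strip (PySem.Chars.join [' '] parts) = PySem.Chars.join [' '] parts := by
  cases hparts : parts with
  | nil => simp [PySem.Chars.join_nil]; rfl
  | cons p ps =>
    obtain ⟨⟨c, l, hcl, hc⟩, ⟨l2, c2, hlc, hc2⟩⟩ :=
      pv_join_ends parts (by simp [hparts]) hp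
    rw [← hparts]
    unfold PySem.Chars.strip PySem.Chars.lstrip PySem.Chars.rstrip
    rw [hcl, List.dropWhile_cons_of_neg (by simp [hc]), ← hcl, hlc]
    simp [List.dropWhile_cons_of_neg, hc2]

-- Str-level: split() ignores the outer strip()
theorem pv_split₀_strip_str (l : String) :
    PySem.Str.split₀ (PySem.Str.strip l) = PySem.Str.split₀ l := by
  unfold PySem.Str.split₀
  rw [PySem.Str.toList_strip, pv_split₀_strip]

-- Str-level: ' '.join(s.split()) is already stripped
theorem pv_strip_join_str (l : String) :
    PySem.Str.strip (PySem.Str.join " " (PySem.Str.split₀ l)) = PySem.Str.join " " (PySem.Str.split₀ l) := by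
  apply String.toList_inj.mp
  rw [PySem.Str.toList_strip, PySem.Str.toList_join, PySem.Str.split₀_map_toList]
  have hsep : (" " : String).toList = [' '] := rfl
  rw [hsep]
  exact pv_strip_join _ (pv_split₀_chunks l.toList)

-- A's per-line value (what the four middle passes compose to)
def pvG (line : String) : String :=
  let s := PySem.Str.join " " (PySem.Str.split₀ line)
  if PySem.Str.startswith s "*>" then PySem.Str.strip (PySem.Str.slice s (some 2) none) else s

-- per-line: A's four passes compose to pvG
theorem pv_line (l : String) :
    PySem.Str.strip
      (if PySem.Str.startswith (PySem.Str.join " " (PySem.Str.split₀ (PySem.Str.strip l))) "*>"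
       then PySem.Str.slice (PySem.Str.join " " (PySem.Str.split₀ (PySem.Str.strip l))) (some 2) none
       else PySem.Str.join " " (PySem.Str.split₀ (PySem.Str.strip l))) = pvG l := by
  rw [pv_split₀_strip_str]
  unfold pvG
  by_cases h : PySem.Str.startswith (PySem.Str.join " " (PySem.Str.split₀ l)) "*>" = true
  · rw [if_pos h, if_pos h]
  · rw [if_neg h, if_neg h, pv_strip_join_str]

-- A's per-line keep predicate
def pvP (s : String) : Bool :=
  (s != "") && !(PySem.Str.startswith s "flags" || PySem.Str.startswith s "S = Stale" || PySem.Str.startswith s "origin")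

-- A's chained passes equal a single pvG/pvP fold, for any list of lines
theorem pv_fuse_aux (ls : List String) (acc : List String) :
    ls.foldl (fun out line => if pvP (pvG line) then out ++ [pvG line] else out) acc =
    acc ++
    (((((ls.map (fun item => PySem.Str.strip item)).map
        (fun item => PySem.Str.join " " (PySem.Str.split₀ item))).map
        (fun item => if PySem.Str.startswith item "*>" then PySem.Str.slice item (some 2) none else item)).map
        (fun item => PySem.Str.strip item)).filter (fun item =>
          !(PySem.Str.startswith item "flags" || PySem.Str.startswith item "S = Stale" || PySem.Str.startswith item "origin"))).filter
        (fun item => item != "") := by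
  induction ls generalizing acc with
  | nil => simp
  | cons l ls ih =>
    simp only [List.foldl_cons, List.map_cons, pvP] at ih ⊢
    rw [pv_line l, List.filter_cons]
    by_cases hOr : (PySem.Str.startswith (pvG l) "flags" || PySem.Str.startswith (pvG l) "S = Stale" || PySem.Str.startswith (pvG l) "origin") = true
    · simp only [hOr, Bool.not_true, Bool.and_false]
      rw [if_neg Bool.false_ne_true, if_neg Bool.false_ne_true]
      exact ih acc
    · have hOr' : (PySem.Str.startswith (pvG l) "flags" || PySem.Str.startswith (pvG l) "S = Stale" || PySem.Str.startswith (pvG l) "origin") = false := by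
        simpa using hOr
      simp only [hOr', Bool.not_false, Bool.and_true]
      simp only [if_true]
      rw [List.filter_cons]
      by_cases hne : (pvG l != "") = true
      · simp only [hne, if_true]
        rw [ih (acc ++ [pvG l]), List.append_assoc, List.singleton_append]
      · have hne' : (pvG l != "") = false := by simpa using hne
        simp only [hne']
        rw [if_neg Bool.false_ne_true, if_neg Bool.false_ne_true]
        exact ih acc

theorem pv_fuse (ls : List String) :
    (((((ls.map (fun item => PySem.Str.strip item)).map
        (fun item => PySem.Str.join " " (PySem.Str.split₀ item))).map
        (fun item => if PySem.Str.startswith item "*>" then PySem.Str.slice item (some 2) none else item)).map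
        (fun item => PySem.Str.strip item)).filter (fun item =>
          !(PySem.Str.startswith item "flags" || PySem.Str.startswith item "S = Stale" || PySem.Str.startswith item "origin"))).filter
        (fun item => item != "") =
    ls.foldl (fun out line => if pvP (pvG line) then out ++ [pvG line] else out) [] := by
  simpa using (pv_fuse_aux ls []).symm

-- ===== token-level lemmas for B =====

-- pulling one character out of a join
theorem pv_join_cons (a : Char) (t' : List Char) (rest : List (List Char)) :
    PySem.Chars.join [' '] ((a :: t') :: rest) = a :: PySem.Chars.join [' '] (t' :: rest) := by
  cases rest with
  | nil => simp [PySem.Chars.join_singleton]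
  | cons r rs => simp [PySem.Chars.join_cons_cons]

theorem pv_join_nil_cons (r : List Char) (rs : List (List Char)) :
    PySem.Chars.join [' '] ([] :: r :: rs) = ' ' :: PySem.Chars.join [' '] (r :: rs) := by
  simp [PySem.Chars.join_cons_cons]

-- a space-free pattern is a prefix of the join iff it is a prefix of the first token
theorem pv_prefix_nospace (pre : List Char) (hpre : ∀ c ∈ pre, c ≠ ' ')
    (t : List Char) (rest : List (List Char)) :
    pre <+: PySem.Chars.join [' '] (t :: rest) ↔ pre <+: t := by
  induction pre generalizing t with
  | nil => simp
  | cons c pre' ih =>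
    cases t with
    | nil =>
      cases rest with
      | nil => simp [PySem.Chars.join_singleton]
      | cons r rs =>
        rw [pv_join_nil_cons]
        constructor
        · intro h
          exact absurd (List.cons_prefix_cons.mp h).1 (hpre c (by simp))
        · intro h
          exact absurd (List.prefix_nil.mp h) (by simp)
    | cons a t' =>
      rw [pv_join_cons, List.cons_prefix_cons, List.cons_prefix_cons]
      exact and_congr_right fun _ => ih (fun x hx => hpre x (by simp [hx])) t'

-- eating one full token and the separating space off a prefix
theorem pv_eat (c : Char) (pre' t : List Char) (ht : t ≠ [])
    (hts : ∀ x ∈ t, PySem.Chars.isspace x = false) (rest : List (List Char)) :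
    (c :: ' ' :: pre' <+: PySem.Chars.join [' '] (t :: rest)) ↔
      t = [c] ∧ ∃ r rs, rest = r :: rs ∧ pre' <+: PySem.Chars.join [' '] (r :: rs) := by
  obtain ⟨a, t', rfl⟩ := List.exists_cons_of_ne_nil ht
  rw [pv_join_cons, List.cons_prefix_cons]
  cases t' with
  | nil =>
    cases rest with
    | nil =>
      rw [PySem.Chars.join_singleton]
      simp [List.prefix_nil]
    | cons r rs =>
      rw [pv_join_nil_cons, List.cons_prefix_cons]
      constructor
      · rintro ⟨rfl, -, hp⟩
        exact ⟨rfl, r, rs, rfl, hp⟩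
      · rintro ⟨h, r', rs', heq, hp⟩
        obtain rfl : a = c := by simpa using h
        cases heq
        exact ⟨rfl, rfl, hp⟩
  | cons d t'' =>
    have hd : d ≠ ' ' := by
      intro h
      have := hts d (by simp)
      rw [h] at this
      exact absurd this (by decide)
    rw [pv_join_cons, List.cons_prefix_cons]
    constructor
    · rintro ⟨-, h, -⟩
      exact absurd h.symm hd
    · rintro ⟨h, -⟩
      exact absurd h (by simp)

-- Bool-level bridge for startswith
theorem pv_sw_iff (s p : String) :
    PySem.Str.startswith s p = true ↔ p.toList <+: s.toList := by
  rw [PySem.Str.startswith_eq]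
  exact PySem.Chars.startswith_iff s.toList p.toList

theorem pv_sw_join_nospace (p : String) (hp : ∀ c ∈ p.toList, c ≠ ' ')
    (v0 : String) (vrest : List String) :
    PySem.Str.startswith (PySem.Str.join " " (v0 :: vrest)) p = PySem.Str.startswith v0 p := by
  rw [Bool.eq_iff_iff, pv_sw_iff, pv_sw_iff, PySem.Str.toList_join]
  have hsep : (" " : String).toList = [' '] := rfl
  rw [hsep]
  simp only [List.map_cons]
  exact pv_prefix_nospace _ hp _ _

-- join of nonempty space-free tokens is a nonempty string
theorem pv_join_ne (v0 : String) (vrest : List String)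
    (hch : ∀ s ∈ v0 :: vrest, s.toList ≠ [] ∧ ∀ c ∈ s.toList, PySem.Chars.isspace c = false) :
    (PySem.Str.join " " (v0 :: vrest) != "") = true := by
  rw [bne_iff_ne]
  intro h
  have h2 : (PySem.Str.join " " (v0 :: vrest)).toList = [] := by rw [h]; rfl
  rw [PySem.Str.toList_join] at h2
  have hsep : (" " : String).toList = [' '] := rfl
  rw [hsep] at h2
  obtain ⟨⟨c, l, hcl, -⟩, -⟩ := pv_join_ends ((v0 :: vrest).map String.toList) (by simp)
    (by intro p hp; obtain ⟨s, hs, rfl⟩ := List.mem_map.mp hp; exact hch s hs)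
  simp only [List.map_cons] at hcl h2
  rw [h2] at hcl
  exact absurd hcl (by simp)

-- toList of a space-join
theorem pv_toList_join (ts : List String) :
    (PySem.Str.join " " ts).toList = PySem.Chars.join [' '] (ts.map String.toList) := by
  rw [PySem.Str.toList_join]
  rw [show (" " : String).toList = [' '] from rfl]

-- every token of a Str-level split() is nonempty and whitespace-free
theorem pv_str_chunks (l : String) :
    ∀ s ∈ PySem.Str.split₀ l, s.toList ≠ [] ∧ ∀ c ∈ s.toList, PySem.Chars.isspace c = false := by
  intro s hs
  have hm : s.toList ∈ PySem.Chars.split₀ l.toList := by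
    rw [← PySem.Str.split₀_map_toList]
    exact List.mem_map_of_mem hs
  exact pv_split₀_chunks _ _ hm

-- eating a token when at least one more token follows
theorem pv_eat_cons (c : Char) (pre' t : List Char) (ht : t ≠ [])
    (hts : ∀ x ∈ t, PySem.Chars.isspace x = false) (r : List Char) (rs : List (List Char)) :
    (c :: ' ' :: pre' <+: PySem.Chars.join [' '] (t :: r :: rs)) ↔
      t = [c] ∧ pre' <+: PySem.Chars.join [' '] (r :: rs) := by
  rw [pv_eat c pre' t ht hts (r :: rs)]
  constructor
  · rintro ⟨h0, r', rs', heq, hp⟩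
    cases heq
    exact ⟨h0, hp⟩
  · rintro ⟨h0, hp⟩
    exact ⟨h0, r, rs, rfl, hp⟩

-- "S = Stale" on the joined line is Source B's stale_heading on the tokens
set_option maxRecDepth 8000 in
theorem pv_stale (v0 : String) (vrest : List String)
    (hch : ∀ s ∈ v0 :: vrest, s.toList ≠ [] ∧ ∀ c ∈ s.toList, PySem.Chars.isspace c = false) :
    PySem.Str.startswith (PySem.Str.join " " (v0 :: vrest)) "S = Stale" = pvStaleTok (v0 :: vrest) := by
  rw [Bool.eq_iff_iff, pv_sw_iff, pv_toList_join]
  rw [show ("S = Stale" : String).toList = 'S' :: ' ' :: '=' :: ' ' :: ['S','t','a','l','e'] from rfl]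
  simp only [List.map_cons]
  cases vrest with
  | nil =>
    rw [pv_eat 'S' _ _ (hch v0 (by simp)).1 (hch v0 (by simp)).2 _]
    simp [pvStaleTok]
  | cons v1 vrest' =>
    simp only [List.map_cons]
    rw [pv_eat_cons 'S' _ _ (hch v0 (by simp)).1 (hch v0 (by simp)).2 _ _]
    cases vrest' with
    | nil =>
      rw [pv_eat '=' _ _ (hch v1 (by simp)).1 (hch v1 (by simp)).2 _]
      simp [pvStaleTok]
    | cons v2 vs =>
      simp only [List.map_cons]
      rw [pv_eat_cons '=' _ _ (hch v1 (by simp)).1 (hch v1 (by simp)).2 _ _]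
      rw [pv_prefix_nospace _ (by intro c hc; fin_cases hc <;> decide) _ _]
      simp only [pvStaleTok, Bool.and_eq_true, beq_iff_eq, pv_sw_iff]
      rw [show (['S'] : List Char) = ("S" : String).toList from rfl,
          show (['='] : List Char) = ("=" : String).toList from rfl,
          String.toList_inj, String.toList_inj]
      tauto

-- the filter stage: B's token tests equal A's string tests on the joined line
theorem pv_filter (out : List String) (v0 : String) (vrest : List String)
    (hch : ∀ s ∈ v0 :: vrest, s.toList ≠ [] ∧ ∀ c ∈ s.toList, PySem.Chars.isspace c = false) :
    (if PySem.Str.startswith v0 "flags" || PySem.Str.startswith v0 "origin" then out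
     else if pvStaleTok (v0 :: vrest) then out
     else out ++ [PySem.Str.join " " (v0 :: vrest)]) =
    if pvP (PySem.Str.join " " (v0 :: vrest))
    then out ++ [PySem.Str.join " " (v0 :: vrest)] else out := by
  unfold pvP
  rw [pv_join_ne v0 vrest hch,
      pv_sw_join_nospace "flags" (by simp) v0 vrest,
      pv_sw_join_nospace "origin" (by simp) v0 vrest,
      pv_stale v0 vrest hch]
  generalize pvStaleTok (v0 :: vrest) = st
  generalize PySem.Str.join " " (v0 :: vrest) = j
  cases PySem.Str.startswith v0 "flags" <;>
    cases PySem.Str.startswith v0 "origin" <;>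
      cases st <;> rfl

-- strip eats a single leading separator space
theorem pv_strip_space_cons (x : List Char) :
    PySem.Chars.strip (' ' :: x) = PySem.Chars.strip x := by
  unfold PySem.Chars.strip PySem.Chars.lstrip
  rw [List.dropWhile_cons_of_pos (by decide)]

-- dropping the whole first token "*>" from the join leaves the join of the remaining tokens
theorem pv_drop_exact (restL : List (List Char))
    (hch : ∀ p ∈ restL, p ≠ [] ∧ ∀ c ∈ p, PySem.Chars.isspace c = false) :
    PySem.Chars.strip (List.drop 2 (PySem.Chars.join [' '] (['*','>'] :: restL))) =
      PySem.Chars.join [' '] restL := by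
  rw [pv_join_cons, pv_join_cons]
  simp only [List.drop_succ_cons, List.drop_zero]
  cases restL with
  | nil =>
    rw [PySem.Chars.join_singleton]
    rw [PySem.Chars.join_nil]
    rfl
  | cons r rs =>
    rw [pv_join_nil_cons, pv_strip_space_cons]
    exact pv_strip_join _ hch

-- dropping the "*>" prefix of the first token from the join leaves the join with the trimmed token
theorem pv_drop_prefix (u : List Char) (hu : u ≠ [])
    (huf : ∀ c ∈ u, PySem.Chars.isspace c = false) (restL : List (List Char))
    (hch : ∀ p ∈ restL, p ≠ [] ∧ ∀ c ∈ p, PySem.Chars.isspace c = false) :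
    PySem.Chars.strip (List.drop 2 (PySem.Chars.join [' '] (('*' :: '>' :: u) :: restL))) =
      PySem.Chars.join [' '] (u :: restL) := by
  rw [pv_join_cons, pv_join_cons]
  simp only [List.drop_succ_cons, List.drop_zero]
  refine pv_strip_join _ ?_
  intro p hp
  rcases (by simpa using hp : p = u ∨ p ∈ restL) with rfl | h2
  · exact ⟨hu, huf⟩
  · exact hch p h2

-- toList of the Str-level tail slice
theorem pv_toList_slice2 (t : String) :
    (PySem.Str.slice t (some 2) none).toList = List.drop 2 t.toList := by
  rw [PySem.Str.toList_slice, PySem.Chars.slice_eq_listSlice,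
      PySem.List.slice_from _ (by norm_num : (0:Int) ≤ 2)]
  rfl

-- per line: B's token-level body computes A's fused per-line step
theorem pv_perline (out : List String) (line : String) :
    (match PySem.Str.split₀ line with
     | [] => out
     | t0 :: rest =>
       let toks :=
         if t0 == "*>" then rest
         else if PySem.Str.startswith t0 "*>" then PySem.Str.slice t0 (some 2) none :: rest
         else t0 :: rest
       match toks with
       | [] => out
       | u0 :: urest =>
         if PySem.Str.startswith u0 "flags" || PySem.Str.startswith u0 "origin" then out
         else if pvStaleTok (u0 :: urest) then out
         else out ++ [PySem.Str.join " " (u0 :: urest)]) =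
    (if pvP (pvG line) then out ++ [pvG line] else out) := by
  cases h : PySem.Str.split₀ line with
  | nil =>
    have hg : pvG line = "" := by simp only [pvG, h]; decide
    rw [hg]
    have hp : pvP "" = false := by decide
    rw [hp]
    simp
  | cons t0 rest =>
    have hch : ∀ s ∈ t0 :: rest, s.toList ≠ [] ∧ ∀ c ∈ s.toList, PySem.Chars.isspace c = false := by
      rw [← h]; exact pv_str_chunks line
    have hchr : ∀ p ∈ rest.map String.toList, p ≠ [] ∧ ∀ c ∈ p, PySem.Chars.isspace c = false := by
      intro p hp
      obtain ⟨s, hs, rfl⟩ := List.mem_map.mp hp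
      exact hch s (by simp [hs])
    have hsw : PySem.Str.startswith (PySem.Str.join " " (t0 :: rest)) "*>" = PySem.Str.startswith t0 "*>" :=
      pv_sw_join_nospace "*>" (by simp) t0 rest
    have hgdef : pvG line =
        (if PySem.Str.startswith (PySem.Str.join " " (t0 :: rest)) "*>"
         then PySem.Str.strip (PySem.Str.slice (PySem.Str.join " " (t0 :: rest)) (some 2) none)
         else PySem.Str.join " " (t0 :: rest)) := by
      simp only [pvG, h]
    by_cases h0 : t0 = "*>"
    · subst h0
      have hswt : PySem.Str.startswith ("*>" : String) "*>" = true := by decide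
      have hgv : pvG line = PySem.Str.join " " rest := by
        rw [hgdef, hsw, hswt, if_pos rfl]
        apply String.toList_inj.mp
        rw [PySem.Str.toList_strip, pv_toList_slice2, pv_toList_join, pv_toList_join]
        simp only [List.map_cons]
        exact pv_drop_exact _ hchr
      rw [hgv]
      simp only [beq_self_eq_true, if_true]
      cases rest with
      | nil =>
        have hp : pvP (PySem.Str.join " " []) = false := by decide
        rw [hp]
        simp
      | cons v0 vr =>
        exact pv_filter out v0 vr (fun s hs => hch s (List.mem_cons_of_mem _ hs))
    · have h0b : (t0 == "*>") = false := by simp [h0]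
      simp only [h0b, Bool.false_eq_true, if_false]
      by_cases h1 : PySem.Str.startswith t0 "*>" = true
      · obtain ⟨u, hu⟩ := (pv_sw_iff t0 "*>").mp h1
        have ht0 : t0.toList = '*' :: '>' :: u := by rw [← hu]; rfl
        have hune : u ≠ [] := by
          intro hue
          apply h0
          apply String.toList_inj.mp
          rw [ht0, hue]
          rfl
        have huf : ∀ c ∈ u, PySem.Chars.isspace c = false := by
          intro c hc
          exact (hch t0 (by simp)).2 c (by rw [ht0]; simp [hc])
        have hslice : (PySem.Str.slice t0 (some 2) none).toList = u := by
          rw [pv_toList_slice2, ht0]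
          rfl
        have hgv : pvG line = PySem.Str.join " " (PySem.Str.slice t0 (some 2) none :: rest) := by
          rw [hgdef, hsw, h1, if_pos rfl]
          apply String.toList_inj.mp
          rw [PySem.Str.toList_strip, pv_toList_slice2, pv_toList_join, pv_toList_join]
          simp only [List.map_cons, ht0, hslice]
          exact pv_drop_prefix u hune huf _ hchr
        rw [hgv, h1]
        simp only [if_true]
        refine pv_filter out _ rest ?_
        intro s hs
        rcases (by simpa using hs : s = PySem.Str.slice t0 (some 2) none ∨ s ∈ rest) with rfl | hs2
        · rw [hslice]; exact ⟨hune, huf⟩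
        · exact hch s (by simp [hs2])
      · have h1b : PySem.Str.startswith t0 "*>" = false := by simpa using h1
        have hgv : pvG line = PySem.Str.join " " (t0 :: rest) := by
          rw [hgdef, hsw, h1b]
          simp
        rw [hgv, h1b]
        simp only [Bool.false_eq_true, if_false]
        exact pv_filter out t0 rest hch

-- the whole pipeline: A's chained passes equal B's token-level fold
set_option maxHeartbeats 1000000 in
theorem pv_final (ls : List String) :
    (((((ls.map (fun item => PySem.Str.strip item)).map
        (fun item => PySem.Str.join " " (PySem.Str.split₀ item))).map
        (fun item => if PySem.Str.startswith item "*>" then PySem.Str.slice item (some 2) none else item)).map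
        (fun item => PySem.Str.strip item)).filter (fun item =>
          !(PySem.Str.startswith item "flags" || PySem.Str.startswith item "S = Stale" || PySem.Str.startswith item "origin"))).filter
        (fun item => item != "") =
    ls.foldl (fun out line =>
      match PySem.Str.split₀ line with
      | [] => out
      | t0 :: rest =>
        let toks :=
          if t0 == "*>" then rest
          else if PySem.Str.startswith t0 "*>" then PySem.Str.slice t0 (some 2) none :: rest
          else t0 :: rest
        match toks with
        | [] => out
        | u0 :: urest =>
          if PySem.Str.startswith u0 "flags" || PySem.Str.startswith u0 "origin" then out
          else if pvStaleTok (u0 :: urest) then out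
          else out ++ [PySem.Str.join " " (u0 :: urest)]) [] := by
  rw [pv_fuse]
  exact List.foldl_ext _ _ _ (fun out line _ => (pv_perline out line).symm)

-- ===== VERDICT (by name: the statement is the Claim_ definition above) =====
set_option maxHeartbeats 1000000 in
theorem parse_ribs_spec : Claim_equal_parse_ribs := by
  intro content _
  show parse_ribs content = parse_ribs_alt content
  unfold parse_ribs parse_ribs_alt
  exact pv_final _
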